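-- pv_equiv track=rewrite | github.com/mohamadsajjadi/Python-for-Progress- | Basics/tamrin dorei/tamrin dorei 2.py | simple_calculations
-- ===== SOURCE A (Python) =====
-- def simple_calculations(ls):
--     sum = 0
--     for i in range(0, len(ls), 2):
--         sum += ls[i]
--     sum_2 = 0
--     for j in range(1, len(ls), 2):
--         sum_2 += ls[j]
--     result = sum - sum_2
--     return result
-- ===== SOURCE B (Python) =====
-- def simple_calculations(ls):
--     result = 0
--     for i, x in enumerate(ls):
--         if i % 2 == 0:
--             result += x
--         else:
--             result -= x
--     return result
-- ===== Notes on version B (the rewrite author's own statement) =====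
-- stated objective: simpler
-- what changed: Replaces A's two separate parity-strided index loops (even-index sum and odd-index sum, subtracted at the end) by a single enumerate pass maintaining one running signed total that adds at even positions and subtracts at odd positions.
import Mathlib
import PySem

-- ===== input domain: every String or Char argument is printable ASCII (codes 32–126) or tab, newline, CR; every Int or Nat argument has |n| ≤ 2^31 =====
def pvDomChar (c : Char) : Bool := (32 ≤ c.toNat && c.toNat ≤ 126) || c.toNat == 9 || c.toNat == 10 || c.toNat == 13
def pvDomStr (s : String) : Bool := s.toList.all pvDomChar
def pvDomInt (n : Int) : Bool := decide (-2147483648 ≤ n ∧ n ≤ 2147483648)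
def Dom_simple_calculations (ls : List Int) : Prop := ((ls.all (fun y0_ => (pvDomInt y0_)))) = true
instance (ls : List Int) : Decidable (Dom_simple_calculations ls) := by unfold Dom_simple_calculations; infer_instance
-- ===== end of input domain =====

-- B replaces A's two parity-strided index loops by one enumerate pass with a single signed accumulator (objective: simpler).


-- ===== PORT A =====
def simple_calculations (ls : List Int) : Int :=
  let sum := (PySem.List.pyRange 0 ls.length 2).foldl
    (fun acc i => acc + PySem.List.pyGetD ls i 0) 0
  let sum_2 := (PySem.List.pyRange 1 ls.length 2).foldl
    (fun acc j => acc + PySem.List.pyGetD ls j 0) 0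
  let result := sum - sum_2
  result

-- ===== PORT B =====
-- 'i % 2' with the positive divisor 2: Python's mod and Lean's Int.emod coincide, so '%' is exact here.
def simple_calculations_alt (ls : List Int) : Int :=
  (PySem.List.enumerate ls 0).foldl
    (fun result p => if p.1 % 2 = 0 then result + p.2 else result - p.2) 0

-- ===== PRECONDITION & SPEC =====
def Spec_simple_calculations (ls : List Int) (out : Int) : Prop := out = simple_calculations_alt ls
instance (ls : List Int) (out : Int) : Decidable (Spec_simple_calculations ls out) := by unfold Spec_simple_calculations; infer_instance

-- ===== CLAIM (what is proved, stated in full; the proofs are below) =====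
def Claim_equal_simple_calculations : Prop := ∀ (ls : List Int), Dom_simple_calculations ls → Spec_simple_calculations ls (simple_calculations ls)

-- ===== LEMMAS AND PROOFS =====

-- alternating sum, the common reference value
def pvAlt : List Int → Int
  | [] => 0
  | a :: l => a - pvAlt l

-- even-index sum and odd-index sum of A, in map-sum form
def pvE (ls : List Int) : Int :=
  ((PySem.List.pyRange 0 ls.length 2).map (fun i => PySem.List.pyGetD ls i 0)).sum
def pvO (ls : List Int) : Int :=
  ((PySem.List.pyRange 1 ls.length 2).map (fun j => PySem.List.pyGetD ls j 0)).sum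

theorem pvA_eq (ls : List Int) : simple_calculations ls = pvE ls - pvO ls := by
  simp [simple_calculations, pvE, pvO, PySem.List.foldl_add]

theorem pv_sum_shift (f g : Nat → Int) (m : Nat) (hf : ∀ k, f (k + 1) = g k) :
    ((List.range (m + 1)).map f).sum = f 0 + ((List.range m).map g).sum := by
  simp [List.range_succ_eq_map, List.map_map, Function.comp_def, hf]

theorem pv_getD_cons_two (a : Int) (l : List Int) (k : Nat) :
    (a :: l).getD (2 * k + 2) 0 = l.getD (2 * k + 1) 0 := by
  show (a :: l).getD (2 * k + 1 + 1) 0 = l.getD (2 * k + 1) 0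
  simp

theorem pvE_cons (a : Int) (l : List Int) : pvE (a :: l) = a + pvO l := by
  rw [pvE, pvO, PySem.List.pyRange_of_pos _ _ (by norm_num : (0:Int) < 2),
      PySem.List.pyRange_of_pos _ _ (by norm_num : (0:Int) < 2), List.map_map, List.map_map]
  have hc1 : (if (0:Int) < (((a :: l).length : Int)) then
      (((((a :: l).length : Int)) - 0 + 2 - 1) / 2).toNat else 0) = l.length / 2 + 1 := by
    simp; omega
  have hc2 : (if (1:Int) < ((l.length : Int)) then
      ((((l.length : Int)) - 1 + 2 - 1) / 2).toNat else 0) = l.length / 2 := by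
    split <;> omega
  rw [hc1, hc2, pv_sum_shift _ (fun k => PySem.List.pyGetD l ((1:Int) + 2 * (k : Nat)) 0)]
  · congr 1
    simp [PySem.List.pyGetD_zero_cons]
  · intro k
    show PySem.List.pyGetD (a :: l) ((0:Int) + 2 * ((k + 1 : Nat) : Int)) 0 = _
    rw [show ((0:Int) + 2 * ((k + 1 : Nat) : Int)) = ((2 * k + 2 : Nat) : Int) by push_cast; ring,
        show ((1:Int) + 2 * ((k : Nat) : Int)) = ((2 * k + 1 : Nat) : Int) by push_cast; ring,
        PySem.List.pyGetD_natCast, PySem.List.pyGetD_natCast, pv_getD_cons_two]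

theorem pvO_cons (a : Int) (l : List Int) : pvO (a :: l) = pvE l := by
  rw [pvO, pvE, PySem.List.pyRange_of_pos _ _ (by norm_num : (0:Int) < 2),
      PySem.List.pyRange_of_pos _ _ (by norm_num : (0:Int) < 2), List.map_map, List.map_map]
  have hc1 : (if (1:Int) < (((a :: l).length : Int)) then
      (((((a :: l).length : Int)) - 1 + 2 - 1) / 2).toNat else 0) = (l.length + 1) / 2 := by
    simp
    by_cases h : 0 < l.length <;> simp [h] <;> omega
  have hc2 : (if (0:Int) < ((l.length : Int)) then
      ((((l.length : Int)) - 0 + 2 - 1) / 2).toNat else 0) = (l.length + 1) / 2 := by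
    by_cases h : 0 < l.length <;> simp [h] <;> omega
  rw [hc1, hc2]
  congr 1
  apply List.map_congr_left
  intro k _
  show PySem.List.pyGetD (a :: l) ((1:Int) + 2 * (k : Int)) 0
      = PySem.List.pyGetD l ((0:Int) + 2 * (k : Int)) 0
  rw [show ((1:Int) + 2 * (k : Int)) = ((2 * k + 1 : Nat) : Int) by push_cast; ring,
      show ((0:Int) + 2 * (k : Int)) = ((2 * k : Nat) : Int) by push_cast; ring,
      PySem.List.pyGetD_natCast, PySem.List.pyGetD_natCast, List.getD_cons_succ]

theorem pvA_alt (ls : List Int) : pvE ls - pvO ls = pvAlt ls := by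
  induction ls with
  | nil => simp [pvE, pvO, pvAlt, PySem.List.pyRange_of_pos 0 0 (by norm_num : (0:Int) < 2),
      PySem.List.pyRange_of_pos 1 0 (by norm_num : (0:Int) < 2)]
  | cons a l ih =>
      rw [pvE_cons, pvO_cons, pvAlt]
      omega

theorem pvB_loop (ls : List Int) (s t : Int) :
    (PySem.List.enumerate ls s).foldl
      (fun result p => if p.1 % 2 = 0 then result + p.2 else result - p.2) t
      = t + (if s % 2 = 0 then pvAlt ls else - pvAlt ls) := by
  induction ls generalizing s t with
  | nil => simp [PySem.List.enumerate, pvAlt]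
  | cons a l ih =>
      rw [PySem.List.enumerate_cons, List.foldl_cons, ih]
      by_cases hp : s % 2 = 0
      · have h1 : (s + 1) % 2 ≠ 0 := by omega
        simp [pvAlt, hp, h1]; ring
      · have h1 : (s + 1) % 2 = 0 := by omega
        simp [pvAlt, hp, h1]; ring

-- ===== VERDICT (by name: the statement is the Claim_ definition above) =====
theorem simple_calculations_spec : Claim_equal_simple_calculations := by
  intro ls _
  show simple_calculations ls = simple_calculations_alt ls
  rw [pvA_eq, pvA_alt, simple_calculations_alt, pvB_loop]
  norm_num
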